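-- pv_equiv track=rewrite | github.com/Pranav-Karra-3301/rif2graph | src/gene_rif_graph/nlp.py | _mark_entities_in_text
-- ===== SOURCE A (Python) =====
-- from typing import List, Dict, Tuple, Optional, Any, Set
--
-- def _mark_entities_in_text(text: str, ent1: Dict, ent2: Dict, offset: int) -> str:
--     """Mark entities in text with special tokens."""
--     # Adjust entity positions relative to context
--     ent1_start = ent1['start'] - offset
--     ent1_end = ent1['end'] - offset
--     ent2_start = ent2['start'] - offset
--     ent2_end = ent2['end'] - offset
--
--     # Insert markers (process in reverse order to maintain positions)
--     markers = [
--         (max(ent1_end, ent2_end), "</ent>"),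
--         (max(ent1_start, ent2_start), "<ent>"),
--         (min(ent1_end, ent2_end), "</ent>"),
--         (min(ent1_start, ent2_start), "<ent>")
--     ]
--
--     for pos, marker in sorted(markers, reverse=True):
--         if 0 <= pos <= len(text):
--             text = text[:pos] + marker + text[pos:]
--
--     return text
-- ===== SOURCE B (Python) =====
-- def _mark_entities_in_text(text: str, ent1, ent2, offset: int) -> str:
--     """Mark entities in text with special tokens.
--
--     Counting pass: no sorting and no repeated slice insertion — for each
--     position i in 0..len(text), emit "</ent>" once per end landing at i,
--     then "<ent>" once per start landing at i, then the character."""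
--     opens = [ent1['start'] - offset, ent2['start'] - offset]
--     closes = [ent1['end'] - offset, ent2['end'] - offset]
--     out = []
--     for i in range(len(text) + 1):
--         out.append("</ent>" * closes.count(i))
--         out.append("<ent>" * opens.count(i))
--         if i < len(text):
--             out.append(text[i])
--     return "".join(out)
-- ===== Notes on version B (the rewrite author's own statement) =====
-- stated objective: alternative
-- what changed: Replaces A's reverse-sorted loop of repeated slice-and-reinsert string rebuilds with a sort-free single counting pass: for each position 0..len(text) it emits '</ent>' per matching end and '<ent>' per matching start (no min/max, no sort) and joins once.
import Mathlib
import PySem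

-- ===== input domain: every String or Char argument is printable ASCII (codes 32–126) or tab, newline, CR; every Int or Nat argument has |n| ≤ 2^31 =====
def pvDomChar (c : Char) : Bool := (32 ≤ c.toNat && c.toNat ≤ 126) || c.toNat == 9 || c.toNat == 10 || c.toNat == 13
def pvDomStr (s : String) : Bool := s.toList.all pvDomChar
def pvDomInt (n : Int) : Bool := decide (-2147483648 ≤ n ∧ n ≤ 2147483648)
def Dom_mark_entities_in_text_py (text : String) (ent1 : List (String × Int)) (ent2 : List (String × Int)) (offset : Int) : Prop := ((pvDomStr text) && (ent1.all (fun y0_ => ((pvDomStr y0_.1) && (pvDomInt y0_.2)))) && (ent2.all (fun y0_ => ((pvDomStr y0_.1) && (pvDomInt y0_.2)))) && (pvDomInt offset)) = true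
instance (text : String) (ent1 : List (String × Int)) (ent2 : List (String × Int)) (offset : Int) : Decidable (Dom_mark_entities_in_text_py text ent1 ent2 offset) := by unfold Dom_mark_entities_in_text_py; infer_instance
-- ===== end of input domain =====

-- B replaces A's reverse-sorted repeated slice-reinsertion with a sort-free counting pass
-- over the positions 0..len(text) ('alternative'; same return value, no speed claim).

-- ===== PORT A =====
-- A-side marker literals ("<ent>" / "</ent>" as code-point lists; strings are ported on the List Char side)
def entOpen : List Char := ['<', 'e', 'n', 't', '>']
def entClose : List Char := ['<', '/', 'e', 'n', 't', '>']

-- one step of A's loop: text = text[:pos] + marker + text[pos:] when 0 <= pos <= len(text)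
def pvInsertA (cs : List Char) (pm : Int × List Char) : List Char :=
  if 0 ≤ pm.1 ∧ pm.1 ≤ (cs.length : Int) then
    PySem.List.slice cs none (some pm.1) ++ pm.2 ++ PySem.List.slice cs (some pm.1) none
  else cs

def mark_entities_in_text_py (text : String) (ent1 : List (String × Int)) (ent2 : List (String × Int)) (offset : Int) : String :=
  match ent1.lookup "start", ent1.lookup "end", ent2.lookup "start", ent2.lookup "end" with
  | some v1s, some v1e, some v2s, some v2e =>
    let ent1_start := v1s - offset
    let ent1_end := v1e - offset
    let ent2_start := v2s - offset
    let ent2_end := v2e - offset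
    let markers : List (Int × List Char) :=
      [(max ent1_end ent2_end, entClose), (max ent1_start ent2_start, entOpen),
       (min ent1_end ent2_end, entClose), (min ent1_start ent2_start, entOpen)]
    -- for pos, marker in sorted(markers, reverse=True): …   (Python tuple sort = sorted2 on fst/snd)
    String.ofList ((PySem.List.sorted2 markers Prod.fst Prod.snd true).foldl pvInsertA text.toList)
  | _, _, _, _ => ""   -- KeyError in Python: excluded by Pre_

-- ===== PORT B =====
-- B-side marker literals
def entOpenB : List Char := ['<', 'e', 'n', 't', '>']
def entCloseB : List Char := ['<', '/', 'e', 'n', 't', '>']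

-- Python "marker" * k (string repetition, k a non-negative count)
def pvRep (m : List Char) (k : Nat) : List Char := (List.replicate k m).flatten

-- text[i]: under the loop guard 0 <= i < len(text) pyGet? is always `some` (exact there)
def pvChar (tl : List Char) (i : Int) : List Char := (PySem.List.pyGet? tl i).elim [] (fun c => [c])

-- one iteration of B's counting loop over position i
def pvStepC (tl : List Char) (opens closes : List Int) (out : List (List Char)) (i : Int) : List (List Char) :=
  let out := out ++ [pvRep entCloseB (PySem.List.count closes i), pvRep entOpenB (PySem.List.count opens i)]
  if i < (tl.length : Int) then out ++ [pvChar tl i] else out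

def mark_entities_in_text_py_alt (text : String) (ent1 : List (String × Int)) (ent2 : List (String × Int)) (offset : Int) : String :=
  match ent1.lookup "start" with
  | none => ""   -- KeyError in Python: excluded by Pre_
  | some v1s =>
    match ent2.lookup "start" with
    | none => ""
    | some v2s =>
      match ent1.lookup "end" with
      | none => ""
      | some v1e =>
        match ent2.lookup "end" with
        | none => ""
        | some v2e =>
          let opens : List Int := [v1s - offset, v2s - offset]
          let closes : List Int := [v1e - offset, v2e - offset]
          let tl := text.toList
          -- for i in range(len(text) + 1): …  (counting pass)
          let out := (PySem.List.pyRange 0 ((tl.length : Int) + 1) 1).foldl (pvStepC tl opens closes) []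
          -- "".join(out)
          String.ofList (PySem.Chars.join [] out)

-- ===== PRECONDITION & SPEC =====
-- Pre_ excludes exactly the inputs where Python's ent['start'] / ent['end'] raises KeyError
-- (a missing 'start' or 'end' key in either entity dict).
def Pre_mark_entities_in_text_py (text : String) (ent1 : List (String × Int)) (ent2 : List (String × Int)) (offset : Int) : Prop :=
  (ent1.lookup "start").isSome = true ∧ (ent1.lookup "end").isSome = true ∧
  (ent2.lookup "start").isSome = true ∧ (ent2.lookup "end").isSome = true
instance (text : String) (ent1 : List (String × Int)) (ent2 : List (String × Int)) (offset : Int) : Decidable (Pre_mark_entities_in_text_py text ent1 ent2 offset) := by unfold Pre_mark_entities_in_text_py; infer_instance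

def pvWitness_mark_entities_in_text_py : String × (List (String × Int)) × (List (String × Int)) × Int :=
  ("gene A binds gene B", [("start", 5), ("end", 6)], [("start", 18), ("end", 19)], 0)

def Spec_mark_entities_in_text_py (text : String) (ent1 : List (String × Int)) (ent2 : List (String × Int)) (offset : Int) (out : String) : Prop := out = mark_entities_in_text_py_alt text ent1 ent2 offset
instance (text : String) (ent1 : List (String × Int)) (ent2 : List (String × Int)) (offset : Int) (out : String) : Decidable (Spec_mark_entities_in_text_py text ent1 ent2 offset out) := by unfold Spec_mark_entities_in_text_py; infer_instance

-- ===== CLAIM (what is proved, stated in full; the proofs are below) =====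
def Claim_equal_mark_entities_in_text_py : Prop := ∀ (text : String) (ent1 : List (String × Int)) (ent2 : List (String × Int)) (offset : Int), Dom_mark_entities_in_text_py text ent1 ent2 offset → Pre_mark_entities_in_text_py text ent1 ent2 offset → Spec_mark_entities_in_text_py text ent1 ent2 offset (mark_entities_in_text_py text ent1 ent2 offset)

-- ===== LEMMAS AND PROOFS =====

-- Python's tuple comparison on (pos, marker) is the lexicographic order: sorted2 is sorted with a Lex key.
def pvKey (x : Int × List Char) : Lex (Int × List Char) := toLex x

theorem pv_sorted2_eq_sorted_lex (m : List (Int × List Char)) (rev : Bool) :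
    PySem.List.sorted2 m Prod.fst Prod.snd rev = PySem.List.sorted m pvKey rev := by
  have hcmp : ∀ a b : Int × List Char,
      (decide (a.1 < b.1) || (!decide (b.1 < a.1) && decide (a.2 < b.2)))
        = decide (pvKey a < pvKey b) := by
    intro a b
    have hlex : (pvKey a < pvKey b) ↔ (a.1 < b.1 ∨ (a.1 = b.1 ∧ a.2 < b.2)) := by
      simpa [pvKey] using (Prod.Lex.lt_iff (x := toLex a) (y := toLex b))
    rw [← decide_not (p := b.1 < a.1), ← Bool.decide_and, ← Bool.decide_or, decide_eq_decide]
    rw [hlex]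
    constructor
    · rintro (h | ⟨h1, h2⟩)
      · exact Or.inl h
      · rcases lt_or_ge a.1 b.1 with hl | hge
        · exact Or.inl hl
        · exact Or.inr ⟨by omega, h2⟩
    · rintro (h | ⟨h1, h2⟩)
      · exact Or.inl h
      · exact Or.inr ⟨by omega, h2⟩
  cases rev
  · simp only [PySem.List.sorted2, PySem.List.sorted, Bool.false_eq_true, if_false]
    congr 1; funext acc x; congr 1; funext a b; rw [hcmp]
  · simp only [PySem.List.sorted2, PySem.List.sorted, if_true]
    congr 1; funext acc x; congr 1; funext a b; rw [hcmp]

theorem pv_sorted_rev_eq_reverse (m : List (Int × List Char)) :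
    PySem.List.sorted m pvKey true = (PySem.List.sorted m pvKey false).reverse := by
  apply PySem.List.eq_of_perm_of_pairwise_le_of_injective
    (key := fun x => OrderDual.toDual (pvKey x))
  · exact OrderDual.toDual.injective.comp (by simpa [pvKey] using (toLex (α := Int × List Char)).injective)
  · exact (PySem.List.sorted_perm m pvKey true).trans
      ((PySem.List.sorted_perm m pvKey false).symm.trans (List.reverse_perm _).symm)
  · have := PySem.List.sorted_pairwise_rev m pvKey
    exact this.imp (fun h => by simpa using h)
  · rw [List.pairwise_reverse]
    have := PySem.List.sorted_pairwise m pvKey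
    exact this.imp (fun h => by simpa using h)

-- A's fold characterised: segGo walks the sorted markers skipping out-of-range ones
def segGo (tl : List Char) (prev : Int) : List (Int × List Char) → List Char
  | [] => PySem.List.slice tl (some prev) none
  | pm :: r =>
    if 0 ≤ pm.1 ∧ pm.1 ≤ (tl.length : Int) then
      PySem.List.slice tl (some prev) (some pm.1) ++ pm.2 ++ segGo tl pm.1 r
    else segGo tl prev r

theorem segGo_nil (tl : List Char) (prev : Int) :
    segGo tl prev [] = PySem.List.slice tl (some prev) none := rfl

theorem segGo_cons (tl : List Char) (prev : Int) (q : Int × List Char) (r : List (Int × List Char)) :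
    segGo tl prev (q :: r)
      = if 0 ≤ q.1 ∧ q.1 ≤ (tl.length : Int) then
          PySem.List.slice tl (some prev) (some q.1) ++ q.2 ++ segGo tl q.1 r
        else segGo tl prev r := rfl

theorem pv_insertA_append_left (xs u : List Char) (p : Int) (m : List Char)
    (hp : (xs.length : Int) ≤ p) :
    pvInsertA (xs ++ u) (p, m) = xs ++ pvInsertA u (p - xs.length, m) := by
  have h0 : (0:Int) ≤ p := le_trans (by positivity) hp
  unfold pvInsertA
  simp only [List.length_append]
  by_cases hc : p ≤ ((xs.length : Int) + (u.length : Int))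
  · rw [if_pos ⟨h0, by push_cast; omega⟩, if_pos ⟨by omega, by omega⟩]
    rw [PySem.List.slice_to _ h0, PySem.List.slice_from _ h0,
        PySem.List.slice_to _ (by omega : (0:Int) ≤ p - (xs.length:Int)),
        PySem.List.slice_from _ (by omega : (0:Int) ≤ p - (xs.length:Int))]
    have hxs : xs.length ≤ p.toNat := by omega
    have hsub : (p - ↑xs.length).toNat = p.toNat - xs.length := by omega
    rw [List.take_append, List.drop_append,
        List.take_of_length_le hxs, List.drop_eq_nil_of_le hxs, hsub]
    simp [List.append_assoc]
  · rw [if_neg (by push_cast; omega), if_neg (by omega)]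

theorem pv_foldr_skip (l : List (Int × List Char)) (tl : List Char)
    (h : ∀ q ∈ l, (tl.length : Int) < q.1) :
    l.foldr (fun pm s => pvInsertA s pm) tl = tl := by
  induction l with
  | nil => rfl
  | cons q r ih =>
    simp only [List.foldr_cons]
    rw [ih (fun x hx => h x (List.mem_cons_of_mem _ hx))]
    unfold pvInsertA
    rw [if_neg (by have := h q (List.mem_cons_self ..); omega)]

theorem pv_foldr_shift (l : List (Int × List Char)) (tl : List Char) (p : Int)
    (hp : 0 ≤ p) (hlen : p ≤ (tl.length : Int)) (hall : ∀ q ∈ l, p ≤ q.1) :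
    l.foldr (fun pm s => pvInsertA s pm) tl
      = tl.take p.toNat
        ++ (l.map (fun q => (q.1 - p, q.2))).foldr (fun pm s => pvInsertA s pm) (tl.drop p.toNat) := by
  induction l with
  | nil =>
    simp only [List.foldr_nil, List.map_nil]
    rw [List.take_append_drop]
  | cons q r ih =>
    simp only [List.foldr_cons, List.map_cons]
    rw [ih (fun x hx => hall x (List.mem_cons_of_mem _ hx))]
    have hq : p ≤ q.1 := hall q (List.mem_cons_self ..)
    have hlt : ((tl.take p.toNat).length : Int) ≤ q.1 := by
      rw [List.length_take]; push_cast; omega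
    have := pv_insertA_append_left (tl.take p.toNat)
      ((r.map (fun q => (q.1 - p, q.2))).foldr (fun pm s => pvInsertA s pm) (tl.drop p.toNat))
      q.1 q.2 hlt
    rw [show ((q.1, q.2) : Int × List Char) = q from rfl] at this
    rw [this]
    congr 2
    rw [List.length_take]
    congr 1
    omega

theorem pv_segGo_skip (l : List (Int × List Char)) (tl : List Char) (prev : Int)
    (h : ∀ q ∈ l, (tl.length : Int) < q.1) :
    segGo tl prev l = PySem.List.slice tl (some prev) none := by
  induction l generalizing prev with
  | nil => rfl
  | cons q r ih =>
    rw [segGo_cons, if_neg (by have := h q (List.mem_cons_self ..); omega)]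
    exact ih prev (fun x hx => h x (List.mem_cons_of_mem _ hx))

theorem pv_segGo_shift (l : List (Int × List Char)) (tl : List Char) (p : Int) :
    ∀ (prev : Int), 0 ≤ p → p ≤ (tl.length : Int) → p ≤ prev → (∀ q ∈ l, p ≤ q.1) →
      segGo tl prev l = segGo (tl.drop p.toNat) (prev - p) (l.map (fun q => (q.1 - p, q.2))) := by
  induction l with
  | nil =>
    intro prev hp hlen hprev _
    rw [segGo_nil, List.map_nil, segGo_nil]
    rw [PySem.List.slice_from _ (by omega : (0:Int) ≤ prev),
        PySem.List.slice_from _ (by omega : (0:Int) ≤ prev - p), List.drop_drop]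
    congr 1
    omega
  | cons q r ih =>
    intro prev hp hlen hprev hall
    have hq : p ≤ q.1 := hall q (List.mem_cons_self ..)
    have hlend : ((tl.drop p.toNat).length : Int) = (tl.length : Int) - p := by
      rw [List.length_drop]; omega
    simp only [List.map_cons, segGo_cons]
    by_cases hc : 0 ≤ q.1 ∧ q.1 ≤ (tl.length : Int)
    · rw [if_pos hc, if_pos (by rw [hlend]; constructor <;> omega)]
      rw [PySem.List.slice_toNat _ (by omega : (0:Int) ≤ prev) (by omega : (0:Int) ≤ q.1),
          PySem.List.slice_toNat _ (by omega : (0:Int) ≤ prev - p) (by omega : (0:Int) ≤ q.1 - p),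
          List.drop_drop]
      rw [ih q.1 hp hlen hq (fun x hx => hall x (List.mem_cons_of_mem _ hx))]
      have h1 : q.1.toNat - prev.toNat = (q.1 - p).toNat - (prev - p).toNat := by omega
      have h2 : p.toNat + (prev - p).toNat = prev.toNat := by omega
      rw [h1, h2]
    · have hgt : (tl.length : Int) < q.1 := by
        rcases not_and_or.mp hc with h | h
        · omega
        · omega
      rw [if_neg hc, if_neg (by rw [hlend]; omega)]
      exact ih prev hp hlen hprev (fun x hx => hall x (List.mem_cons_of_mem _ hx))

theorem pv_foldr_eq_segGo : ∀ (n : Nat) (l : List (Int × List Char)) (tl : List Char),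
    l.length = n → l.Pairwise (fun p q => p.1 ≤ q.1) →
    l.foldr (fun pm s => pvInsertA s pm) tl = segGo tl 0 l := by
  intro n
  induction n with
  | zero =>
    intro l tl hlen _
    rw [List.length_eq_zero_iff.mp hlen, List.foldr_nil, segGo_nil]
    rw [PySem.List.slice_from _ le_rfl]
    simp
  | succ n ih =>
    intro l tl hlen hpair
    cases l with
    | nil => simp at hlen
    | cons pm rest =>
      have hrlen : rest.length = n := by simpa using hlen
      have hall : ∀ q ∈ rest, pm.1 ≤ q.1 := (List.pairwise_cons.mp hpair).1
      have hptail : rest.Pairwise (fun p q => p.1 ≤ q.1) := (List.pairwise_cons.mp hpair).2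
      by_cases h0 : 0 ≤ pm.1
      · by_cases hl : pm.1 ≤ (tl.length : Int)
        · have htake : ((tl.take pm.1.toNat).length : Int) = pm.1 := by
            rw [List.length_take]; push_cast; omega
          simp only [List.foldr_cons]
          rw [pv_foldr_shift rest tl pm.1 h0 hl hall]
          rw [show pm = (pm.1, pm.2) from rfl,
              pv_insertA_append_left _ _ _ _ (le_of_eq htake)]
          have hz : pm.1 - ((tl.take pm.1.toNat).length : Int) = 0 := by omega
          rw [hz]
          have hmap : (rest.map (fun q => (q.1 - pm.1, q.2))).Pairwise
              (fun p q : Int × List Char => p.1 ≤ q.1) := by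
            rw [List.pairwise_map]
            exact hptail.imp (fun h => by omega)
          rw [show pvInsertA ((rest.map (fun q => (q.1 - pm.1, q.2))).foldr
                (fun pm s => pvInsertA s pm) (tl.drop pm.1.toNat)) (0, pm.2)
              = pm.2 ++ (rest.map (fun q => (q.1 - pm.1, q.2))).foldr
                (fun pm s => pvInsertA s pm) (tl.drop pm.1.toNat) from by
            unfold pvInsertA
            rw [if_pos ⟨le_rfl, by positivity⟩,
                PySem.List.slice_to _ le_rfl, PySem.List.slice_from _ le_rfl]
            simp]
          rw [ih _ _ (by simpa using hrlen) hmap]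
          rw [segGo_cons, if_pos ⟨h0, hl⟩]
          rw [pv_segGo_shift rest tl pm.1 pm.1 h0 hl le_rfl hall, sub_self]
          rw [PySem.List.slice_toNat _ le_rfl h0]
          simp [List.append_assoc]
        · have hbig : ∀ q ∈ pm :: rest, (tl.length : Int) < q.1 := by
            intro q hq
            rcases List.mem_cons.mp hq with h | h
            · subst h; omega
            · have := hall q h; omega
          rw [pv_foldr_skip _ _ hbig, pv_segGo_skip _ _ _ hbig,
              PySem.List.slice_from _ le_rfl]
          simp
      · simp only [List.foldr_cons]
        rw [show pvInsertA (rest.foldr (fun pm s => pvInsertA s pm) tl) pm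
            = rest.foldr (fun pm s => pvInsertA s pm) tl from by
          unfold pvInsertA; rw [if_neg (by omega)]]
        rw [segGo_cons, if_neg (by omega)]
        exact ih _ _ hrlen hptail

-- ========== B-side characterisation ==========

-- segGoF: segGo on a list already filtered to in-range positions (no checks)
def segGoF (tl : List Char) (prev : Int) : List (Int × List Char) → List Char
  | [] => PySem.List.slice tl (some prev) none
  | pm :: r => PySem.List.slice tl (some prev) (some pm.1) ++ pm.2 ++ segGoF tl pm.1 r

def pvInR (tl : List Char) (q : Int × List Char) : Bool :=
  decide (0 ≤ q.1) && decide (q.1 ≤ (tl.length : Int))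

theorem pv_segGo_eq_segGoF (tl : List Char) :
    ∀ (l : List (Int × List Char)) (prev : Int),
      segGo tl prev l = segGoF tl prev (l.filter (pvInR tl)) := by
  intro l
  induction l with
  | nil => intro prev; rfl
  | cons q r ih =>
    intro prev
    by_cases hc : 0 ≤ q.1 ∧ q.1 ≤ (tl.length : Int)
    · rw [segGo_cons, if_pos hc,
          show (q :: r).filter (pvInR tl) = q :: r.filter (pvInR tl) from by
            simp [pvInR, hc.1, hc.2]]
      rw [segGoF, ih q.1]
    · rw [segGo_cons, if_neg hc,
          show (q :: r).filter (pvInR tl) = r.filter (pvInR tl) from by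
            rcases not_and_or.mp hc with h | h <;> simp [pvInR, h]]
      exact ih prev

-- the per-position marker group and the per-position emitted chars
def pvGrp (opens closes : List Int) (j : Int) : List (Int × List Char) :=
  List.replicate (PySem.List.count closes j) (j, entCloseB)
    ++ List.replicate (PySem.List.count opens j) (j, entOpenB)

def pvH (tl : List Char) (opens closes : List Int) (j : Int) : List Char :=
  pvRep entCloseB (PySem.List.count closes j) ++ pvRep entOpenB (PySem.List.count opens j)
    ++ (if j < (tl.length : Int) then pvChar tl j else [])

theorem pv_join_nil_flatten (ps : List (List Char)) : PySem.Chars.join [] ps = ps.flatten := by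
  induction ps with
  | nil => simp [PySem.Chars.join, List.intercalate]
  | cons h t ih =>
    cases t with
    | nil => simp [PySem.Chars.join, List.intercalate]
    | cons h2 t2 =>
      simp only [PySem.Chars.join, List.intercalate] at ih ⊢
      simp [List.intersperse_cons₂, ih, List.flatten]

-- B's loop, flattened: each iteration contributes pvH
theorem pv_foldl_stepC (tl : List Char) (opens closes : List Int) :
    ∀ (l : List Int) (acc : List (List Char)),
      (l.foldl (pvStepC tl opens closes) acc).flatten
        = acc.flatten ++ l.flatMap (pvH tl opens closes) := by
  intro l
  induction l with
  | nil => intro acc; simp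
  | cons j r ih =>
    intro acc
    rw [List.foldl_cons, ih, List.flatMap_cons]
    unfold pvStepC pvH
    by_cases hc : j < (tl.length : Int)
    · rw [if_pos hc, if_pos hc]
      simp [List.flatten_append, List.append_assoc]
    · rw [if_neg hc, if_neg hc]
      simp [List.flatten_append, List.append_assoc]

-- a group of k markers at the current position emits just the k marker copies
theorem pv_segGoF_replicate (tl : List Char) (p : Int) (m : List Char) (hp : 0 ≤ p) :
    ∀ (k : Nat) (l : List (Int × List Char)),
      segGoF tl p (List.replicate k (p, m) ++ l) = pvRep m k ++ segGoF tl p l := by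
  intro k
  induction k with
  | zero => intro l; simp [pvRep]
  | succ k ih =>
    intro l
    rw [List.replicate_succ, List.cons_append, segGoF, ih]
    have hslice : PySem.List.slice tl (some p) (some p) = [] := by
      rw [PySem.List.slice_toNat _ hp hp]; simp
    rw [hslice]
    simp [pvRep, List.replicate_succ, List.append_assoc]

-- advancing one character when every remaining marker lies strictly beyond position i
theorem pv_segGoF_advance (tl : List Char) (i : Int) (hi : 0 ≤ i) (hlt : i < (tl.length : Int))
    (l : List (Int × List Char)) (hall : ∀ q ∈ l, i + 1 ≤ q.1) :
    segGoF tl i l = pvChar tl i ++ segGoF tl (i + 1) l := by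
  have hidx : i.toNat < tl.length := by omega
  have hchar : pvChar tl i = [tl[i.toNat]] := by
    unfold pvChar
    rw [PySem.List.pyGet?_eq_some_getElem _ hi (by simpa using hlt)]
    rfl
  have hdrop : tl.drop i.toNat = tl[i.toNat] :: tl.drop (i.toNat + 1) :=
    List.drop_eq_getElem_cons hidx
  have htn : (i + 1).toNat = i.toNat + 1 := by omega
  cases l with
  | nil =>
    rw [segGoF, segGoF, PySem.List.slice_from _ hi,
        PySem.List.slice_from _ (by omega : (0:Int) ≤ i + 1), hchar, htn, hdrop]
    rfl
  | cons q r =>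
    have hq : i + 1 ≤ q.1 := hall q (List.mem_cons_self ..)
    rw [segGoF, segGoF, hchar]
    rw [PySem.List.slice_toNat _ hi (by omega : (0:Int) ≤ q.1),
        PySem.List.slice_toNat _ (by omega : (0:Int) ≤ i + 1) (by omega : (0:Int) ≤ q.1)]
    rw [hdrop]
    have h1 : q.1.toNat - i.toNat = (q.1.toNat - (i + 1).toNat) + 1 := by omega
    rw [h1, List.take_succ_cons, htn]
    simp [List.append_assoc]

-- every marker produced by the groups beyond position i lies beyond i
theorem pv_mem_flatMap_grp (opens closes : List Int) (js : List Int)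
    (q : Int × List Char) (hq : q ∈ js.flatMap (pvGrp opens closes)) : q.1 ∈ js := by
  obtain ⟨j, hj, hmem⟩ := List.mem_flatMap.mp hq
  unfold pvGrp at hmem
  rcases List.mem_append.mp hmem with h | h
  · rw [List.eq_of_mem_replicate h]; exact hj
  · rw [List.eq_of_mem_replicate h]; exact hj

-- the main walk: group markers at 0..n emitted position by position are B's counting pass
theorem pv_main (tl : List Char) (opens closes : List Int) :
    ∀ (m : Nat) (i : Int), 0 ≤ i → i + m = (tl.length : Int) + 1 →
      segGoF tl i ((PySem.List.pyRange i ((tl.length : Int) + 1) 1).flatMap (pvGrp opens closes))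
        = (PySem.List.pyRange i ((tl.length : Int) + 1) 1).flatMap (pvH tl opens closes) := by
  intro m
  induction m with
  | zero =>
    intro i hi hsum
    rw [PySem.List.pyRange_one_eq_nil (by omega)]
    rw [List.flatMap_nil, List.flatMap_nil, segGoF,
        PySem.List.slice_from _ hi]
    rw [List.drop_eq_nil_of_le (by omega)]
  | succ m ih =>
    intro i hi hsum
    rw [PySem.List.pyRange_one_cons (by omega)]
    rw [List.flatMap_cons, List.flatMap_cons]
    rw [show pvGrp opens closes i
          = List.replicate (PySem.List.count closes i) (i, entCloseB)
            ++ List.replicate (PySem.List.count opens i) (i, entOpenB) from rfl,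
        show pvH tl opens closes i
          = pvRep entCloseB (PySem.List.count closes i) ++ pvRep entOpenB (PySem.List.count opens i)
            ++ (if i < (tl.length : Int) then pvChar tl i else []) from rfl]
    rw [List.append_assoc, pv_segGoF_replicate _ _ _ hi, pv_segGoF_replicate _ _ _ hi]
    by_cases hlt : i < (tl.length : Int)
    · rw [pv_segGoF_advance tl i hi hlt _ (fun q hq => by
        have := pv_mem_flatMap_grp opens closes _ q hq
        exact (PySem.List.mem_pyRange_one.mp this).1)]
      rw [ih (i + 1) (by omega) (by omega), if_pos hlt]
      simp [List.append_assoc]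
    · have hieq : i = (tl.length : Int) := by omega
      rw [PySem.List.pyRange_one_eq_nil (by omega)]
      rw [List.flatMap_nil, List.flatMap_nil, segGoF,
          PySem.List.slice_from _ hi, List.drop_eq_nil_of_le (by omega), if_neg hlt]
      simp

-- ===== the sorted in-range markers ARE the position-by-position groups =====

theorem pv_count_grp_ne (opens closes : List Int) (j : Int) (x : Int × List Char)
    (h : x.1 ≠ j) : List.count x (pvGrp opens closes j) = 0 := by
  rw [List.count_eq_zero]
  intro hx
  unfold pvGrp at hx
  rcases List.mem_append.mp hx with hm | hm
  · exact h (by rw [List.eq_of_mem_replicate hm])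
  · exact h (by rw [List.eq_of_mem_replicate hm])

theorem pv_count_flatMap_grp (opens closes : List Int) (x : Int × List Char) :
    ∀ (js : List Int), js.Nodup →
      List.count x (js.flatMap (pvGrp opens closes))
        = if x.1 ∈ js then List.count x (pvGrp opens closes x.1) else 0 := by
  intro js
  induction js with
  | nil => intro _; simp
  | cons j r ih =>
    intro hnd
    rw [List.flatMap_cons, List.count_append, ih (List.nodup_cons.mp hnd).2]
    by_cases hj : x.1 = j
    · subst hj
      rw [if_neg (List.nodup_cons.mp hnd).1, if_pos (List.mem_cons_self ..)]
      omega
    · rw [pv_count_grp_ne _ _ _ _ hj]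
      by_cases hr : x.1 ∈ r
      · rw [if_pos hr, if_pos (List.mem_cons_of_mem _ hr)]; omega
      · rw [if_neg hr, if_neg (by simp [hj, hr])]

theorem pv_minmax_perm (x y : Int) (m : List Char) :
    ([(max x y, m), (min x y, m)] : List (Int × List Char)).Perm [(x, m), (y, m)] := by
  rcases le_total x y with h | h
  · rw [max_eq_right h, min_eq_left h]
    exact List.Perm.swap _ _ _
  · rw [max_eq_left h, min_eq_right h]

-- antisymmetry of the Python tuple order on markers
theorem pv_key_antisymm (p q : Int × List Char) (h1 : pvKey p ≤ pvKey q) (h2 : pvKey q ≤ pvKey p) :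
    p = q := by
  have := le_antisymm h1 h2
  exact (toLex (α := Int × List Char)).injective (by simpa [pvKey] using this)

theorem pv_close_lt_open : (entCloseB : List Char) < entOpenB := by decide

theorem pv_grp_pairwise (opens closes : List Int) (j : Int) :
    (pvGrp opens closes j).Pairwise (fun p q => pvKey p ≤ pvKey q) := by
  unfold pvGrp
  rw [List.pairwise_append]
  refine ⟨List.pairwise_replicate.mpr (Or.inr le_rfl),
          List.pairwise_replicate.mpr (Or.inr le_rfl), ?_⟩
  intro a ha b hb
  rw [List.eq_of_mem_replicate ha, List.eq_of_mem_replicate hb]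
  rw [pvKey, pvKey, Prod.Lex.le_iff]
  exact Or.inr ⟨rfl, le_of_lt pv_close_lt_open⟩

theorem pv_canon_pairwise (opens closes : List Int) :
    ∀ (js : List Int), js.Pairwise (· < ·) →
      (js.flatMap (pvGrp opens closes)).Pairwise (fun p q => pvKey p ≤ pvKey q) := by
  intro js
  induction js with
  | nil => intro _; simp
  | cons j r ih =>
    intro hp
    rw [List.flatMap_cons, List.pairwise_append]
    refine ⟨pv_grp_pairwise _ _ _, ih (List.pairwise_cons.mp hp).2, ?_⟩
    intro a ha b hb
    have haj : a.1 = j := by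
      unfold pvGrp at ha
      rcases List.mem_append.mp ha with h | h
      · rw [List.eq_of_mem_replicate h]
      · rw [List.eq_of_mem_replicate h]
    have hbj : b.1 ∈ r := pv_mem_flatMap_grp _ _ _ _ hb
    have hlt : a.1 < b.1 := by
      rw [haj]
      exact (List.pairwise_cons.mp hp).1 _ hbj
    rw [pvKey, pvKey, Prod.Lex.le_iff]
    exact Or.inl hlt

-- the two per-position marker counts, on the group side and on the plain marker list
theorem pv_count_grp (opens closes : List Int) (p : Int) (mk : List Char) :
    List.count (p, mk) (pvGrp opens closes p)
      = (if ((p, entCloseB) : Int × List Char) = (p, mk) then List.count p closes else 0)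
        + (if ((p, entOpenB) : Int × List Char) = (p, mk) then List.count p opens else 0) := by
  simp [pvGrp, List.count_append, List.count_replicate, PySem.List.count_eq, beq_iff_eq]

theorem pv_count_plain (a b c d p : Int) (mk : List Char) :
    List.count (p, mk)
        ([(b, entClose), (d, entClose), (a, entOpen), (c, entOpen)] : List (Int × List Char))
      = (if ((p, entCloseB) : Int × List Char) = (p, mk) then List.count p [b, d] else 0)
        + (if ((p, entOpenB) : Int × List Char) = (p, mk) then List.count p [a, c] else 0) := by
  have hne : entClose ≠ entOpen := by decide
  have hcb : entCloseB = entClose := rfl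
  have hob : entOpenB = entOpen := rfl
  rw [hcb, hob]
  simp only [List.count_cons, List.count_nil, beq_iff_eq, Prod.mk.injEq]
  split_ifs <;> simp_all

-- counts agree: the in-range markers and the groups are the same multiset
theorem pv_canon_perm (tl : List Char) (a b c d : Int) :
    (([(max b d, entClose), (max a c, entOpen), (min b d, entClose), (min a c, entOpen)]
        : List (Int × List Char)).filter (pvInR tl)).Perm
      ((PySem.List.pyRange 0 ((tl.length : Int) + 1) 1).flatMap (pvGrp [a, c] [b, d])) := by
  have hplain : (([(max b d, entClose), (max a c, entOpen), (min b d, entClose), (min a c, entOpen)]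
      : List (Int × List Char))).Perm [(b, entClose), (d, entClose), (a, entOpen), (c, entOpen)] := by
    have h1 : (([(max b d, entClose), (max a c, entOpen), (min b d, entClose), (min a c, entOpen)]
        : List (Int × List Char))).Perm
        [(max b d, entClose), (min b d, entClose), (max a c, entOpen), (min a c, entOpen)] :=
      List.Perm.cons _ (List.Perm.swap _ _ _)
    refine h1.trans ?_
    have h2 := (pv_minmax_perm b d entClose).append (pv_minmax_perm a c entOpen)
    simpa using h2
    
  refine ((hplain.filter (pvInR tl)).trans ?_)
  rw [List.perm_iff_count]
  intro x
  obtain ⟨p, mk⟩ := x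
  have hnd : (PySem.List.pyRange 0 ((tl.length : Int) + 1) 1).Nodup :=
    PySem.List.nodup_pyRange_one _ _
  rw [pv_count_flatMap_grp _ _ _ _ hnd]
  by_cases hin : (0 ≤ p ∧ p ≤ (tl.length : Int))
  · have hmem : p ∈ PySem.List.pyRange 0 ((tl.length : Int) + 1) 1 :=
      PySem.List.mem_pyRange_one.mpr ⟨hin.1, by omega⟩
    rw [List.count_filter (by simp [pvInR, hin.1, hin.2]), if_pos hmem]
    rw [pv_count_plain a b c d p mk, pv_count_grp [a, c] [b, d] p mk]
  · rw [if_neg (by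
      intro hmem
      exact hin ⟨(PySem.List.mem_pyRange_one.mp hmem).1,
        by have := (PySem.List.mem_pyRange_one.mp hmem).2; omega⟩)]
    rw [List.count_eq_zero]
    intro hmem2
    rcases List.mem_filter.mp hmem2 with ⟨_, hr⟩
    simp only [pvInR, Bool.and_eq_true, decide_eq_true_eq] at hr
    exact hin hr

-- the sorted in-range list equals the canonical position-by-position groups
theorem pv_sorted_filter_eq_canon (tl : List Char) (a b c d : Int) :
    (PySem.List.sorted
        ([(max b d, entClose), (max a c, entOpen), (min b d, entClose), (min a c, entOpen)]
          : List (Int × List Char)) pvKey false).filter (pvInR tl)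
      = (PySem.List.pyRange 0 ((tl.length : Int) + 1) 1).flatMap (pvGrp [a, c] [b, d]) := by
  refine List.Perm.eq_of_pairwise (le := fun p q => pvKey p ≤ pvKey q)
    (fun p q _ _ h1 h2 => pv_key_antisymm p q h1 h2)
    ((PySem.List.sorted_pairwise _ pvKey).filter _)
    (pv_canon_pairwise _ _ _ (PySem.List.pairwise_lt_pyRange_one 0 _))
    (((PySem.List.sorted_perm _ pvKey false).filter (pvInR tl)).trans
      (pv_canon_perm tl a b c d))

-- glue: A's whole computation equals B's whole computation on the char lists
theorem pv_core (tl : List Char) (a b c d : Int) :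
    (PySem.List.sorted2
        ([(max b d, entClose), (max a c, entOpen), (min b d, entClose), (min a c, entOpen)]
          : List (Int × List Char)) Prod.fst Prod.snd true).foldl pvInsertA tl
      = PySem.Chars.join []
          ((PySem.List.pyRange 0 ((tl.length : Int) + 1) 1).foldl
            (pvStepC tl [a, c] [b, d]) []) := by
  rw [pv_sorted2_eq_sorted_lex, pv_sorted_rev_eq_reverse, List.foldl_reverse]
  have hpair : (PySem.List.sorted
      ([(max b d, entClose), (max a c, entOpen), (min b d, entClose), (min a c, entOpen)]
        : List (Int × List Char)) pvKey false).Pairwise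
      (fun p q : Int × List Char => p.1 ≤ q.1) := by
    refine (PySem.List.sorted_pairwise _ pvKey).imp (fun h => ?_)
    rcases Prod.Lex.le_iff.mp h with h1 | ⟨h1, _⟩
    · simpa using le_of_lt h1
    · simpa using le_of_eq h1
  rw [pv_foldr_eq_segGo _ _ tl rfl hpair]
  rw [pv_segGo_eq_segGoF, pv_sorted_filter_eq_canon]
  rw [pv_main tl [a, c] [b, d] ((tl.length : Int) + 1).toNat 0 le_rfl (by omega)]
  rw [pv_join_nil_flatten, pv_foldl_stepC]
  simp

-- ===== VERDICT (by name: the statement is the Claim_ definition above) =====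
theorem mark_entities_in_text_py_spec : Claim_equal_mark_entities_in_text_py := by
  intro text ent1 ent2 offset _hdom hpre
  obtain ⟨h1, h2, h3, h4⟩ := hpre
  obtain ⟨v1s, hv1⟩ := Option.isSome_iff_exists.mp h1
  obtain ⟨v1e, hv2⟩ := Option.isSome_iff_exists.mp h2
  obtain ⟨v2s, hv3⟩ := Option.isSome_iff_exists.mp h3
  obtain ⟨v2e, hv4⟩ := Option.isSome_iff_exists.mp h4
  unfold Spec_mark_entities_in_text_py mark_entities_in_text_py mark_entities_in_text_py_alt
  rw [hv1, hv2, hv3, hv4]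
  simp only
  exact congrArg String.ofList (pv_core _ _ _ _ _)
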